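-- pv_equiv track=rewrite | github.com/jojostx/algos-and-ds | week3_greedy_algorithms/3_car_fueling/car_fueling.py | min_refills
-- ===== SOURCE A (Python) =====
-- def min_refills(distance, tank, stops):
--     # Add the destination as a final "stop" but without mutating the input
--     stops = stops + [distance]
--
--     refills = 0
--     current_stop = 0
--     last_refill_stop = 0
--     i = 0
--
--     while current_stop < distance:
--         last_refill_stop = current_stop
--
--         # Move as far as possible without running out of fuel
--         while i < len(stops) and stops[i] - last_refill_stop <= tank:
--             current_stop = stops[i]
--             i += 1
--
--         # If it is not possible to refill at any other stops to complete the journey, journey is impossible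
--         if current_stop == last_refill_stop:
--             return -1
--
--         # Count refill if we haven't reached the destination
--         if current_stop < distance:
--             refills += 1
--
--     return refills
-- ===== SOURCE B (Python) =====
-- def min_refills(distance, tank, stops):
--     # Segment-consuming rewrite: each round finds the cut point of the remaining
--     # route with a generator expression and slices it away; no nested loops, no
--     # persistent index shared between loops.
--     if distance <= 0:
--         return 0
--     pts = stops + [distance]
--     last, refills = 0, 0
--     while True:
--         cut = next((i for i, p in enumerate(pts) if p - last > tank), len(pts))
--         if cut == 0:
--             return -1
--         cur = pts[cut - 1]
--         if cur >= distance: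
--             return refills
--         last, pts, refills = cur, pts[cut:], refills + 1
-- ===== Notes on version B (the rewrite author's own statement) =====
-- stated objective: simpler
-- what changed: Replaces A's nested while-loops sharing a persistent index by a segment-consuming loop: each round locates the cut point of the remaining route with a generator expression and slices the list there, so there is no inner loop and no index bookkeeping.
import Mathlib
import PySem

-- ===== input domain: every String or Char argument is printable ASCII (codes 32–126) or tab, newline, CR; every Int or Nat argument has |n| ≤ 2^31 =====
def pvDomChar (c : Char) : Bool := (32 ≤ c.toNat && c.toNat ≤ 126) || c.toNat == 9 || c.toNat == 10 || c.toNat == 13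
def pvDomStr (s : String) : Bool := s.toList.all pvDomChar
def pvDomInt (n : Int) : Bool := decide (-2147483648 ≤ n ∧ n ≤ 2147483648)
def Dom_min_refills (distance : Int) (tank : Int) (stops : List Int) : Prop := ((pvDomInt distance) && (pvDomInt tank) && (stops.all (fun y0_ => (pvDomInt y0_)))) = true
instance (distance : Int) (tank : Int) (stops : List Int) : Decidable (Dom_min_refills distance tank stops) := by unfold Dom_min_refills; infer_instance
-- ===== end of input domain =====

-- B consumes the route segment by segment (find the cut index, slice it away),
-- replacing A's nested while-loops with a shared persistent index; objective: simpler.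

-- ===== PORT A =====
-- inner while loop of A: consume stops while stops[i] - last_refill_stop <= tank, tracking current_stop
def pvAdvance (tank : Int) : List Int → Int → Int → Int × List Int
  | [], _, cur => (cur, [])
  | p :: r, last, cur =>
    if p - last ≤ tank then pvAdvance tank r last p else (cur, p :: r)

theorem pvAdvance_len_le (tank : Int) : ∀ (rest : List Int) (last cur : Int),
    (pvAdvance tank rest last cur).2.length ≤ rest.length := by
  intro rest
  induction rest with
  | nil => intro last cur; simp [pvAdvance]
  | cons p r ih =>
    intro last cur
    simp only [pvAdvance]
    split
    · exact Nat.le_trans (ih last p) (Nat.le_succ _)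
    · exact Nat.le_refl _

theorem pvAdvance_progress (tank : Int) : ∀ (rest : List Int) (last : Int),
    (pvAdvance tank rest last last).1 ≠ last →
    (pvAdvance tank rest last last).2.length < rest.length := by
  intro rest last h
  cases rest with
  | nil => simp [pvAdvance] at h
  | cons p r =>
    simp only [pvAdvance] at h ⊢
    split at h
    · rename_i hp
      simp only [if_pos hp]
      exact Nat.lt_succ_of_le (pvAdvance_len_le tank r last p)
    · simp at h

-- outer while loop of A: state (remaining stops suffix, current_stop, refills)
def pvOuterA (distance tank : Int) (rest : List Int) (cur refills : Int) : Int :=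
  if cur < distance then
    let last := cur
    let res := pvAdvance tank rest last cur
    if res.1 = last then -1
    else pvOuterA distance tank res.2 res.1
           (if res.1 < distance then refills + 1 else refills)
  else refills
termination_by rest.length
decreasing_by exact pvAdvance_progress tank rest cur (by assumption)

def min_refills (distance : Int) (tank : Int) (stops : List Int) : Int :=
  pvOuterA distance tank (stops ++ [distance]) 0 0

-- ===== PORT B =====
-- B's while-True loop; cut = next((i for i,p in enumerate(pts) if p - last > tank), len(pts))
-- is List.findIdx (which returns pts.length when no element matches, exactly Python's default);
-- pts[cut-1] is in range whenever cut ≠ 0, so getD with a dummy default is exact there.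
def pvGoB (distance tank : Int) (last : Int) (pts : List Int) (refills : Int) : Int :=
  let cut := pts.findIdx (fun p => decide (tank < p - last))
  if hc : cut = 0 then -1
  else
    let cur := pts.getD (cut - 1) 0
    if distance ≤ cur then refills
    else pvGoB distance tank cur (pts.drop cut) (refills + 1)
termination_by pts.length
decreasing_by
  have h1 : pts.findIdx (fun p => decide (tank < p - last)) ≤ pts.length :=
    List.findIdx_le_length
  simp only [List.length_drop]
  omega

def min_refills_alt (distance : Int) (tank : Int) (stops : List Int) : Int :=
  if distance ≤ 0 then 0
  else pvGoB distance tank 0 (stops ++ [distance]) 0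

-- ===== PRECONDITION & SPEC =====
def Spec_min_refills (distance : Int) (tank : Int) (stops : List Int) (out : Int) : Prop := out = min_refills_alt distance tank stops
instance (distance : Int) (tank : Int) (stops : List Int) (out : Int) : Decidable (Spec_min_refills distance tank stops out) := by unfold Spec_min_refills; infer_instance

-- ===== CLAIM (what is proved, stated in full; the proofs are below) =====
def Claim_equal_min_refills : Prop := ∀ (distance : Int) (tank : Int) (stops : List Int), Dom_min_refills distance tank stops → Spec_min_refills distance tank stops (min_refills distance tank stops)

-- ===== LEMMAS AND PROOFS =====

-- A's inner loop expressed through B's building blocks: findIdx/getD/drop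
theorem pvAdvance_eq_find (tank : Int) : ∀ (pts : List Int) (last cur0 : Int),
    pvAdvance tank pts last cur0 =
      (let cut := pts.findIdx (fun p => decide (tank < p - last));
       ((if cut = 0 then cur0 else pts.getD (cut - 1) 0), pts.drop cut)) := by
  intro pts
  induction pts with
  | nil => intro last cur0; simp [pvAdvance]
  | cons p r ih =>
    intro last cur0
    by_cases hp : p - last ≤ tank
    · have hb : (fun p => decide (tank < p - last)) p = false := by
        simp; omega
      simp only [pvAdvance, if_pos hp, List.findIdx_cons, hb, cond_false]
      rw [ih last p]
      simp only
      cases hcut : r.findIdx (fun p => decide (tank < p - last)) with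
      | zero => simp [List.getD]
      | succ k => simp [List.getD]
    · have hb : (fun p => decide (tank < p - last)) p = true := by
        simp; omega
      rw [pvAdvance, if_neg hp]
      simp [List.findIdx_cons, hb]

-- the element at a successful findIdx satisfies the predicate
theorem find_elem_prop (tank last : Int) (pts : List Int)
    (h : pts.findIdx (fun p => decide (tank < p - last)) < pts.length) :
    tank < pts[pts.findIdx (fun p => decide (tank < p - last))]'h - last := by
  have := List.findIdx_getElem (p := fun p => decide (tank < p - last)) (w := h)
  simpa using this

-- main alignment: with last < distance, B's loop equals A's outer loop
theorem pvGo_eq_outer (distance tank : Int) : ∀ (pts : List Int) (last refills : Int),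
    last < distance →
    pvGoB distance tank last pts refills = pvOuterA distance tank pts last refills := by
  intro pts
  induction pts using (measure List.length).wf.induction with
  | _ pts ih =>
  intro last refills hl
  rw [pvGoB, pvOuterA, if_pos hl]
  simp only [pvAdvance_eq_find]
  set cut := pts.findIdx (fun p => decide (tank < p - last)) with hcutdef
  have hcle : cut ≤ pts.length := List.findIdx_le_length
  by_cases hc : cut = 0
  · simp [hc]
  · simp only [dif_neg hc, if_neg hc]
    set cur := pts.getD (cut - 1) 0 with hcurdef
    by_cases he : cur = last
    · -- A returns -1 here; B takes one more round, whose cut is 0, and returns -1 too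
      rw [if_pos he]
      have hcur_lt : cur < distance := he ▸ hl
      rw [if_neg (not_le.mpr hcur_lt)]
      have hdl : (pts.drop cut).length < pts.length := by
        have : 0 < pts.length := by omega
        simp only [List.length_drop]; omega
      rw [ih (pts.drop cut) hdl cur (refills + 1) hcur_lt]
      rw [pvOuterA, if_pos hcur_lt]
      have hfind0 : (pts.drop cut).findIdx (fun p => decide (tank < p - cur)) = 0 := by
        cases hdrop : pts.drop cut with
        | nil => simp [List.findIdx, List.findIdx.go]
        | cons q rest =>
          have hcutlt : cut < pts.length := by
            by_contra hge
            have : pts.drop cut = [] := List.drop_eq_nil_of_le (by omega)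
            simp [this] at hdrop
          have hq : q = pts[cut]'hcutlt := by
            have := List.getElem_drop (xs := pts) (i := cut) (j := 0) (h := by simp [hdrop])
            simpa [hdrop] using this
          have hqp : tank < q - last := by
            rw [hq]; exact find_elem_prop tank last pts hcutlt
          have : tank < q - cur := by rw [he]; exact hqp
          simp [List.findIdx_cons, this]
      simp only [pvAdvance_eq_find, hfind0]
      simp [he]
    · rw [if_neg he]
      by_cases hd : distance ≤ cur
      · rw [if_pos hd, pvOuterA, if_neg (not_lt.mpr hd)]
        simp [not_lt.mpr hd]
      · have hcd : cur < distance := lt_of_not_ge hd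
        rw [if_neg hd, if_pos hcd]
        have hdl : (pts.drop cut).length < pts.length := by
          have : 0 < pts.length := by omega
          simp only [List.length_drop]; omega
        exact ih (pts.drop cut) hdl cur (refills + 1) hcd

-- ===== VERDICT (by name: the statement is the Claim_ definition above) =====
theorem min_refills_spec : Claim_equal_min_refills := by
  intro distance tank stops _
  unfold Spec_min_refills min_refills min_refills_alt
  by_cases h0 : distance ≤ 0
  · rw [pvOuterA]
    simp [not_lt.mpr h0, h0]
  · have h0' : (0 : Int) < distance := lt_of_not_ge h0
    rw [if_neg h0]
    exact (pvGo_eq_outer distance tank (stops ++ [distance]) 0 0 h0').symm
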